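-- pv_equiv track=rewrite | github.com/QwQ-maker/4box | 新改/generate_report.py | compute_nl
-- ===== SOURCE A (Python) =====
-- def compute_nl(sbox, n):
--     size = 1 << n
--     min_nl = size
--     for v in range(1, size):
--         tt = [bin(v & sbox[x]).count('1') % 2 for x in range(size)]
--         w = [(-1)**b for b in tt]
--         step = 1
--         while step < size:
--             for i in range(0, size, step * 2):
--                 for j in range(step):
--                     a, b = w[i+j], w[i+j+step]
--                     w[i+j], w[i+j+step] = a+b, a-b
--             step *= 2
--         nl = (size // 2) - max(abs(x) for x in w) // 2
--         min_nl = min(min_nl, nl)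
--     return min_nl
-- ===== SOURCE B (Python) =====
-- def compute_nl(sbox, n):
--     size = 1 << n
--
--     def fwht(w):
--         # recursive Walsh-Hadamard: H_{2m} = [[H,H],[H,-H]] on contiguous halves
--         if len(w) <= 1:
--             return w
--         h = len(w) // 2
--         a = fwht(w[:h])
--         b = fwht(w[h:])
--         return [x + y for x, y in zip(a, b)] + [x - y for x, y in zip(a, b)]
--
--     min_nl = size
--     for v in range(1, size):
--         w = fwht([(-1) ** (bin(v & sbox[x]).count('1') % 2) for x in range(size)])
--         min_nl = min(min_nl, size // 2 - max(abs(x) for x in w) // 2)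
--     return min_nl
-- ===== Notes on version B (the rewrite author's own statement) =====
-- stated objective: alternative
-- what changed: The in-place iterative butterfly (three nested loops mutating w with a doubling step) is replaced by a recursive divide-and-conquer FWHT that splits the sign vector into contiguous halves, transforms each recursively and combines them as [a+b]++[a-b]; the truth-table construction is fused into one comprehension and nl is inlined.
import Mathlib
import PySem

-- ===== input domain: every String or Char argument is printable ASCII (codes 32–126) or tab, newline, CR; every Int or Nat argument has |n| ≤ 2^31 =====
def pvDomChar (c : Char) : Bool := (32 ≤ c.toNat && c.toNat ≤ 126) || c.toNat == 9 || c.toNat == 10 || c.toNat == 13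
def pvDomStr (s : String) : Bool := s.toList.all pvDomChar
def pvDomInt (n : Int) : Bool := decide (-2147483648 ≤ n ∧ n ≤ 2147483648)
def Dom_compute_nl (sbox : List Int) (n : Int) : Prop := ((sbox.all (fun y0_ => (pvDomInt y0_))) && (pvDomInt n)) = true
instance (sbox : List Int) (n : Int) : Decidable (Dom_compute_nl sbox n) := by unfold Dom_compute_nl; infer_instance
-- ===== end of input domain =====

-- B replaces A's in-place iterative butterfly by a recursive halves-based FWHT (alternative
-- decomposition, same cost); equivalence of the two transforms is proved by induction on n.

-- ===== PORT A =====

-- sign vector entry: (-1) ** (bin(v & sbox[x]).count('1') % 2); 'v & sbox[x]' is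
-- PySem.Int.band (Python-exact on negatives) and for the nonnegative result
-- bin(...).count('1') is PySem.Int.bitCount.
def pvSign (sbox : List Int) (v : Int) (x : Nat) : Int :=
  (-1 : Int) ^ (PySem.Int.bitCount (PySem.Int.band v (sbox.getD x 0)) % 2)

-- one butterfly: a, b = w[i+j], w[i+j+step]; w[i+j], w[i+j+step] = a+b, a-b
def pvBfly (w : List Int) (idx s : Nat) : List Int :=
  let a := w.getD idx 0
  let b := w.getD (idx + s) 0
  (w.set idx (a + b)).set (idx + s) (a - b)

-- inner loop: for j in range(step)
def pvInner (w : List Int) (i s : Nat) : List Int :=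
  (List.range s).foldl (fun w2 j => pvBfly w2 (i + j) s) w

-- middle loop: for i in range(0, size, step*2)  (size is a power of two, so the
-- Python range has exactly size / (2*step) elements, as here)
def pvPass (s size : Nat) (w : List Int) : List Int :=
  (List.range' 0 (size / (2 * s)) (2 * s)).foldl (fun w2 i => pvInner w2 i s) w

-- while step < size: ... ; step *= 2  ('0 < s' only makes the loop terminating; A always starts at s = 1)
def pvIter (size s : Nat) (w : List Int) : List Int :=
  if _h : 0 < s ∧ s < size then pvIter size (2 * s) (pvPass s size w) else w
  termination_by size - s
  decreasing_by omega

-- nl = size // 2 - max(abs(x) for x in w) // 2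
def pvNl (size : Nat) (w : List Int) : Int :=
  PySem.Int.floordiv (size : Int) 2 -
    PySem.Int.floordiv ((PySem.List.max? (w.map (fun x => |x|)) (fun y => y)).getD 0) 2

def compute_nl (sbox : List Int) (n : Int) : Int :=
  let size : Nat := 1 <<< n.toNat
  (List.range' 1 (size - 1)).foldl
    (fun min_nl v =>
      let tt := (List.range size).map
        (fun x => PySem.Int.bitCount (PySem.Int.band (v : Int) (sbox.getD x 0)) % 2)
      let w0 := tt.map (fun b => (-1 : Int) ^ b)
      let w := pvIter size 1 w0
      min min_nl (pvNl size w))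
    (size : Int)

-- ===== PORT B =====

-- recursive FWHT on contiguous halves: [a[i]+b[i]] ++ [a[i]-b[i]]
def pvFwht (w : List Int) : List Int :=
  if _h : w.length ≤ 1 then w
  else
    let h := w.length / 2
    let a := pvFwht (w.take h)
    let b := pvFwht (w.drop h)
    List.zipWith (· + ·) a b ++ List.zipWith (· - ·) a b
  termination_by w.length
  decreasing_by
  · simp; omega
  · simp; omega

def compute_nl_alt (sbox : List Int) (n : Int) : Int :=
  let size : Nat := 1 <<< n.toNat
  (List.range' 1 (size - 1)).foldl
    (fun min_nl v =>
      let w := pvFwht ((List.range size).map (fun x => pvSign sbox (v : Int) x))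
      min min_nl (pvNl size w))
    (size : Int)

-- ===== PRECONDITION & SPEC =====
-- Pre_ excludes exactly the inputs where Python A raises: n < 0 (ValueError from 1 << n)
-- and, for n ≥ 1, a table shorter than 2^n (IndexError on sbox[x]);
-- '1 ≤ sbox.length >>> n.toNat' says 2^n ≤ sbox.length.
def Pre_compute_nl (sbox : List Int) (n : Int) : Prop :=
  0 ≤ n ∧ (n = 0 ∨ 1 ≤ sbox.length >>> n.toNat)
instance (sbox : List Int) (n : Int) : Decidable (Pre_compute_nl sbox n) := by
  unfold Pre_compute_nl; infer_instance

def pvWitness_compute_nl : List Int × Int := ([3, 0, 1, 2], 2)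

def Spec_compute_nl (sbox : List Int) (n : Int) (out : Int) : Prop := out = compute_nl_alt sbox n
instance (sbox : List Int) (n : Int) (out : Int) : Decidable (Spec_compute_nl sbox n out) := by
  unfold Spec_compute_nl; infer_instance

-- ===== CLAIM (what is proved, stated in full; the proofs are below) =====
def Claim_equal_compute_nl : Prop := ∀ (sbox : List Int) (n : Int),
  Dom_compute_nl sbox n → Pre_compute_nl sbox n → Spec_compute_nl sbox n (compute_nl sbox n)

-- ===== LEMMAS AND PROOFS =====

theorem pvGetD_set (w : List Int) (i : Nat) (a : Int) (p : Nat) (h : i < w.length) :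
    (w.set i a).getD p 0 = if p = i then a else w.getD p 0 := by
  by_cases hp : p = i
  · subst hp; simp [List.getD_eq_getElem?_getD, h]
  · simp [List.getD_eq_getElem?_getD, List.getElem?_set_ne (fun hh => hp hh.symm), hp]

theorem pvBfly_length (w : List Int) (i s : Nat) : (pvBfly w i s).length = w.length := by
  simp [pvBfly]

theorem pvBfly_getD (w : List Int) (idx s p : Nat) (h1 : idx + s < w.length) (hs : 0 < s) :
    (pvBfly w idx s).getD p 0 =
      if p = idx then w.getD idx 0 + w.getD (idx + s) 0
      else if p = idx + s then w.getD idx 0 - w.getD (idx + s) 0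
      else w.getD p 0 := by
  unfold pvBfly
  rw [pvGetD_set _ _ _ _ (by simp; omega), pvGetD_set _ _ _ _ (by omega)]
  split_ifs <;> first | rfl | omega

theorem pvFoldBfly_length (l : List Nat) (i s : Nat) (w : List Int) :
    (l.foldl (fun w2 j => pvBfly w2 (i + j) s) w).length = w.length := by
  induction l generalizing w with
  | nil => rfl
  | cons a t ih => simp only [List.foldl_cons]; rw [ih, pvBfly_length]

theorem pvInner_aux (i s : Nat) (hs : 0 < s) : ∀ (cnt t : Nat) (w : List Int),
    t + cnt ≤ s → i + 2 * s ≤ w.length → ∀ p,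
    ((List.range' t cnt).foldl (fun w2 j => pvBfly w2 (i + j) s) w).getD p 0 =
      if i + t ≤ p ∧ p < i + t + cnt then w.getD p 0 + w.getD (p + s) 0
      else if i + s + t ≤ p ∧ p < i + s + t + cnt then w.getD (p - s) 0 - w.getD p 0
      else w.getD p 0 := by
  intro cnt
  induction cnt with
  | zero => intro t w _ _ p; simp only [List.range'_zero, List.foldl_nil]
            split_ifs <;> first | rfl | omega
  | succ c ih =>
    intro t w hts hlen p
    rw [List.range'_succ, List.foldl_cons]
    have hlen' : i + 2 * s ≤ (pvBfly w (i + t) s).length := by rw [pvBfly_length]; exact hlen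
    rw [ih (t + 1) _ (by omega) hlen' p]
    have hb : ∀ q, (pvBfly w (i + t) s).getD q 0 =
        if q = i + t then w.getD (i + t) 0 + w.getD (i + t + s) 0
        else if q = i + t + s then w.getD (i + t) 0 - w.getD (i + t + s) 0
        else w.getD q 0 := fun q => pvBfly_getD w (i + t) s q (by omega) hs
    rw [hb p, hb (p + s), hb (p - s)]
    split_ifs <;>
      first
        | rfl | omega
        | (have e1 : p - s = i + t := by omega
           have e2 : p = i + t + s := by omega
           rw [e1, e2])
        | (have e1 : p + s = i + t + s := by omega
           have e2 : p = i + t := by omega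
           rw [e1, e2])

theorem pvInner_length (w : List Int) (i s : Nat) : (pvInner w i s).length = w.length :=
  pvFoldBfly_length _ _ _ _

theorem pvInner_getD (w : List Int) (i s : Nat) (hs : 0 < s) (hlen : i + 2 * s ≤ w.length)
    (p : Nat) :
    (pvInner w i s).getD p 0 =
      if i ≤ p ∧ p < i + s then w.getD p 0 + w.getD (p + s) 0
      else if i + s ≤ p ∧ p < i + 2 * s then w.getD (p - s) 0 - w.getD p 0
      else w.getD p 0 := by
  unfold pvInner
  rw [List.range_eq_range', pvInner_aux i s hs s 0 w (by omega) hlen p]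
  split_ifs <;> first | rfl | omega

theorem pvFoldInner_length (l : List Nat) (s : Nat) (w : List Int) :
    (l.foldl (fun w2 i => pvInner w2 i s) w).length = w.length := by
  induction l generalizing w with
  | nil => rfl
  | cons a t ih => simp only [List.foldl_cons]; rw [ih, pvInner_length]

theorem pvPassAux (s : Nat) (hs : 0 < s) : ∀ (k c : Nat) (w : List Int),
    c + k * (2 * s) ≤ w.length → ∀ p,
    ((List.range' c k (2 * s)).foldl (fun w2 i => pvInner w2 i s) w).getD p 0 =
      if c ≤ p ∧ p < c + k * (2 * s) then
        (if (p - c) % (2 * s) < s then w.getD p 0 + w.getD (p + s) 0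
         else w.getD (p - s) 0 - w.getD p 0)
      else w.getD p 0 := by
  intro k
  induction k with
  | zero => intro c w _ p; simp only [List.range'_zero, List.foldl_nil]
            split_ifs <;> first | rfl | omega
  | succ m ih =>
    intro c w hlen p
    rw [List.range'_succ, List.foldl_cons]
    have hstep : (m + 1) * (2 * s) = m * (2 * s) + 2 * s := by ring
    have hlen0 : c + 2 * s ≤ w.length := by omega
    have hlen' : c + 2 * s + m * (2 * s) ≤ (pvInner w c s).length := by
      rw [pvInner_length]; omega
    rw [ih (c + 2 * s) _ hlen' p]
    have hi : ∀ q, (pvInner w c s).getD q 0 =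
        if c ≤ q ∧ q < c + s then w.getD q 0 + w.getD (q + s) 0
        else if c + s ≤ q ∧ q < c + 2 * s then w.getD (q - s) 0 - w.getD q 0
        else w.getD q 0 := fun q => pvInner_getD w c s hs hlen0 q
    by_cases hin : c + 2 * s ≤ p ∧ p < c + 2 * s + m * (2 * s)
    · -- p is in a later block: the inner pass at c does not touch p, p+s, p-s
      have hmod : (p - c) % (2 * s) = (p - (c + 2 * s)) % (2 * s) := by
        have : p - c = (p - (c + 2 * s)) + 2 * s := by omega
        rw [this, Nat.add_mod_right]
      rw [if_pos hin]
      rw [if_pos (by constructor <;> omega : c ≤ p ∧ p < c + (m + 1) * (2 * s))]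
      rw [hi p, hi (p + s), hi (p - s)]
      rw [hmod]
      have hml : (p - (c + 2 * s)) % (2 * s) ≤ p - (c + 2 * s) := Nat.mod_le _ _
      have hml2 : (p - (c + 2 * s)) % (2 * s) < 2 * s := Nat.mod_lt _ (by omega)
      split_ifs <;> first | rfl | omega
    · -- p is in the first block (or outside everything)
      rw [if_neg hin, hi p]
      by_cases hfst : c ≤ p ∧ p < c + 2 * s
      · have hmod : (p - c) % (2 * s) = p - c := Nat.mod_eq_of_lt (by omega)
        rw [if_pos (by constructor <;> omega : c ≤ p ∧ p < c + (m + 1) * (2 * s)), hmod]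
        split_ifs <;> first | rfl | omega
      · rw [if_neg (by omega : ¬(c ≤ p ∧ p < c + (m + 1) * (2 * s)))]
        split_ifs <;> first | rfl | omega

theorem pvPass_length (s size : Nat) (w : List Int) : (pvPass s size w).length = w.length :=
  pvFoldInner_length _ _ _

theorem pvPass_getD (s : Nat) (hs : 0 < s) (size : Nat) (w : List Int)
    (hsize : w.length = size) (hdvd : 2 * s ∣ size) (p : Nat) :
    (pvPass s size w).getD p 0 =
      if p < size then
        (if p % (2 * s) < s then w.getD p 0 + w.getD (p + s) 0
         else w.getD (p - s) 0 - w.getD p 0)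
      else w.getD p 0 := by
  unfold pvPass
  have hk : size / (2 * s) * (2 * s) = size := Nat.div_mul_cancel hdvd
  rw [pvPassAux s hs (size / (2 * s)) 0 w (by omega) p]
  simp only [Nat.zero_add, Nat.sub_zero, hk]
  split_ifs <;> first | rfl | omega

theorem pvExt_getD (l1 l2 : List Int) (hl : l1.length = l2.length)
    (h : ∀ p, p < l1.length → l1.getD p 0 = l2.getD p 0) : l1 = l2 := by
  apply List.ext_getElem hl
  intro i h1 h2
  rw [← List.getD_eq_getElem l1 0 h1, ← List.getD_eq_getElem l2 0 h2]
  exact h i h1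

theorem pvPartner_lt (s h p : Nat) (hs : 0 < s) (hdvd : 2 * s ∣ h) (hp : p < h)
    (hr : p % (2 * s) < s) : p + s < h := by
  obtain ⟨t, ht⟩ := hdvd
  have e1 : 2 * s * (p / (2 * s)) + p % (2 * s) = p := Nat.div_add_mod p (2 * s)
  have e3 : t * (2 * s) = h := by rw [ht]; ring
  have hq : p / (2 * s) < t := (Nat.div_lt_iff_lt_mul (by omega)).2 (by omega)
  have h2 : (p / (2 * s) + 1) * (2 * s) ≤ t * (2 * s) := Nat.mul_le_mul_right _ hq
  have e2 : (p / (2 * s) + 1) * (2 * s) = 2 * s * (p / (2 * s)) + 2 * s := by ring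
  omega

theorem pvPass_split (s h : Nat) (hs : 0 < s) (hdvd : 2 * s ∣ h) (a b : List Int)
    (ha : a.length = h) (hb : b.length = h) :
    pvPass s (2 * h) (a ++ b) = pvPass s h a ++ pvPass s h b := by
  have hdvd2 : 2 * s ∣ 2 * h := hdvd.mul_left 2
  have hlab : (a ++ b).length = 2 * h := by simp [ha, hb]; omega
  have hra : (pvPass s h a).length = h := by rw [pvPass_length, ha]
  have hrb : (pvPass s h b).length = h := by rw [pvPass_length, hb]
  apply pvExt_getD
  · rw [pvPass_length, hlab]; simp [hra, hrb]; omega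
  · intro p hplen
    rw [pvPass_length, hlab] at hplen
    rw [pvPass_getD s hs (2 * h) (a ++ b) hlab hdvd2 p, if_pos hplen]
    have hmodle : p % (2 * s) ≤ p := Nat.mod_le _ _
    by_cases hpa : p < h
    · -- p lies in the a-half; its partner does too
      have hRHS : (pvPass s h a ++ pvPass s h b).getD p 0 = (pvPass s h a).getD p 0 :=
        List.getD_append _ _ _ _ (by rw [hra]; omega)
      rw [hRHS, pvPass_getD s hs h a ha hdvd p, if_pos hpa]
      split_ifs with hr
      · have hps : p + s < h := pvPartner_lt s h p hs hdvd hpa hr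
        rw [List.getD_append _ _ _ _ (by rw [ha]; omega),
            List.getD_append _ _ _ _ (by rw [ha]; omega)]
      · rw [List.getD_append _ _ _ _ (by rw [ha]; omega),
            List.getD_append _ _ _ _ (by rw [ha]; omega)]
    · -- p lies in the b-half
      obtain ⟨t, ht⟩ := hdvd
      have hmod : p % (2 * s) = (p - h) % (2 * s) := by
        have e : p = (p - h) + (2 * s) * t := by omega
        conv_lhs => rw [e]
        rw [Nat.add_mul_mod_self_left]
      have hRHS : (pvPass s h a ++ pvPass s h b).getD p 0 =
          (pvPass s h b).getD (p - (pvPass s h a).length) 0 :=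
        List.getD_append_right _ _ _ _ (by rw [hra]; omega)
      rw [hra] at hRHS
      rw [hRHS, pvPass_getD s hs h b hb ⟨t, ht⟩ (p - h), if_pos (by omega : p - h < h)]
      have hmodle2 : (p - h) % (2 * s) ≤ p - h := Nat.mod_le _ _
      rw [hmod]
      split_ifs with hr
      · have hps : (p - h) + s < h := pvPartner_lt s h (p - h) hs ⟨t, ht⟩ (by omega) hr
        rw [List.getD_append_right _ _ _ _ (by rw [ha]; omega), ha,
            List.getD_append_right _ _ _ _ (by rw [ha]; omega), ha]
        congr 2
        omega
      · rw [List.getD_append_right _ _ _ _ (by rw [ha]; omega), ha,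
            List.getD_append_right _ _ _ _ (by rw [ha]; omega), ha]
        congr 2
        omega

theorem pvZip_getD (f : Int → Int → Int) (a b : List Int) (h : Nat)
    (ha : a.length = h) (hb : b.length = h) (p : Nat) (hp : p < h) :
    (List.zipWith f a b).getD p 0 = f (a.getD p 0) (b.getD p 0) := by
  have hz : (List.zipWith f a b).length = h := by simp [ha, hb]
  rw [List.getD_eq_getElem _ _ (by omega), List.getD_eq_getElem _ _ (by omega),
      List.getD_eq_getElem _ _ (by omega), List.getElem_zipWith]

theorem pvPass_final (h : Nat) (hh : 0 < h) (a b : List Int)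
    (ha : a.length = h) (hb : b.length = h) :
    pvPass h (2 * h) (a ++ b) =
      List.zipWith (· + ·) a b ++ List.zipWith (· - ·) a b := by
  have hlab : (a ++ b).length = 2 * h := by simp [ha, hb]; omega
  have hzp : (List.zipWith (· + ·) a b).length = h := by simp [ha, hb]
  have hzm : (List.zipWith (· - ·) a b).length = h := by simp [ha, hb]
  apply pvExt_getD
  · rw [pvPass_length, hlab]; simp [hzp, hzm]; omega
  · intro p hplen
    rw [pvPass_length, hlab] at hplen
    rw [pvPass_getD h hh (2 * h) (a ++ b) hlab ⟨1, by ring⟩ p, if_pos hplen]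
    by_cases hpa : p < h
    · have hRHS : (List.zipWith (· + ·) a b ++ List.zipWith (· - ·) a b).getD p 0 =
          (List.zipWith (· + ·) a b).getD p 0 :=
        List.getD_append _ _ _ _ (by rw [hzp]; omega)
      rw [hRHS, pvZip_getD _ a b h ha hb p hpa,
          if_pos (by rw [Nat.mod_eq_of_lt (by omega)]; omega),
          List.getD_append _ _ _ _ (by rw [ha]; omega),
          List.getD_append_right _ _ _ _ (by rw [ha]; omega), ha]
      congr 2
      omega
    · have hRHS : (List.zipWith (· + ·) a b ++ List.zipWith (· - ·) a b).getD p 0 =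
          (List.zipWith (· - ·) a b).getD (p - (List.zipWith (· + ·) a b).length) 0 :=
        List.getD_append_right _ _ _ _ (by rw [hzp]; omega)
      rw [hzp] at hRHS
      rw [hRHS, pvZip_getD _ a b h ha hb (p - h) (by omega),
          if_neg (by rw [Nat.mod_eq_of_lt (by omega)]; omega),
          List.getD_append _ _ _ _ (by rw [ha]; omega),
          List.getD_append_right _ _ _ _ (by rw [ha]; omega), ha]

theorem pvIter_stop (size s : Nat) (w : List Int) (h : ¬ s < size) : pvIter size s w = w := by
  rw [pvIter, dif_neg (by omega)]

theorem pvIter_step (size s : Nat) (w : List Int) (h0 : 0 < s) (h1 : s < size) :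
    pvIter size s w = pvIter size (2 * s) (pvPass s size w) := by
  conv_lhs => rw [pvIter]
  rw [dif_pos ⟨h0, h1⟩]

theorem pvIter_split (k j : Nat) (hj : j ≤ k) (a b : List Int)
    (ha : a.length = 2 ^ k) (hb : b.length = 2 ^ k) :
    pvIter (2 ^ (k + 1)) (2 ^ j) (a ++ b) =
      pvPass (2 ^ k) (2 ^ (k + 1)) (pvIter (2 ^ k) (2 ^ j) a ++ pvIter (2 ^ k) (2 ^ j) b) := by
  have hpos : 0 < (2:Nat) ^ j := by positivity
  have h2 : 2 * (2:Nat) ^ j = 2 ^ (j + 1) := by ring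
  by_cases hjk : j = k
  · subst hjk
    rw [pvIter_step _ _ _ hpos (Nat.pow_lt_pow_right (by omega) (by omega)), h2,
        pvIter_stop _ _ _ (by omega),
        pvIter_stop _ _ _ (by omega), pvIter_stop _ _ _ (by omega)]
  · have hjk' : j < k := by omega
    have hsplit : pvPass (2 ^ j) (2 ^ (k + 1)) (a ++ b) =
        pvPass (2 ^ j) (2 ^ k) a ++ pvPass (2 ^ j) (2 ^ k) b := by
      have e : (2:Nat) ^ (k + 1) = 2 * 2 ^ k := by ring
      rw [e]
      exact pvPass_split _ _ hpos (by rw [h2]; exact pow_dvd_pow 2 (by omega)) a b ha hb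
    rw [pvIter_step _ _ _ hpos
          (Nat.pow_lt_pow_right (by omega) (by omega)), h2, hsplit,
        pvIter_split k (j + 1) (by omega) _ _ (by rw [pvPass_length, ha]) (by rw [pvPass_length, hb]),
        pvIter_step (2 ^ k) (2 ^ j) a hpos (Nat.pow_lt_pow_right (by omega) hjk'), h2,
        pvIter_step (2 ^ k) (2 ^ j) b hpos (Nat.pow_lt_pow_right (by omega) hjk'), h2]
  termination_by k - j

theorem pvFwht_length (k : Nat) : ∀ w : List Int, w.length = 2 ^ k → (pvFwht w).length = 2 ^ k := by
  induction k with
  | zero => intro w hw; rw [pvFwht, dif_pos (by omega)]; exact hw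
  | succ k ih =>
    intro w hw
    have h1 : 1 ≤ (2:Nat) ^ k := Nat.one_le_two_pow
    have he : (2:Nat) ^ (k + 1) = 2 * 2 ^ k := by ring
    have hh : w.length / 2 = 2 ^ k := by omega
    have ha : (w.take (w.length / 2)).length = 2 ^ k := by rw [List.length_take]; omega
    have hb : (w.drop (w.length / 2)).length = 2 ^ k := by rw [List.length_drop]; omega
    rw [pvFwht, dif_neg (by omega)]
    simp only [List.length_append, List.length_zipWith, ih _ ha, ih _ hb]
    omega

theorem pvIter_eq_pvFwht (k : Nat) (w : List Int) (hw : w.length = 2 ^ k) :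
    pvIter (2 ^ k) 1 w = pvFwht w := by
  induction k generalizing w with
  | zero =>
    rw [pvIter_stop _ _ _ (by norm_num), pvFwht, dif_pos (by omega)]
  | succ k ih =>
    have hle : (2:Nat) ^ k ≤ 2 ^ (k + 1) := Nat.pow_le_pow_right (by omega) (by omega)
    have he : (2:Nat) ^ (k + 1) = 2 * 2 ^ k := by ring
    have ha : (w.take (2 ^ k)).length = 2 ^ k := by simp [hw]; omega
    have hb : (w.drop (2 ^ k)).length = 2 ^ k := by simp [hw]; omega
    have hab : w = w.take (2 ^ k) ++ w.drop (2 ^ k) := (List.take_append_drop _ w).symm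
    have hsplit0 := pvIter_split k 0 (Nat.zero_le k) (w.take (2 ^ k)) (w.drop (2 ^ k)) ha hb
    rw [pow_zero] at hsplit0
    conv_lhs => rw [hab]
    rw [hsplit0, ih _ ha, ih _ hb]
    have hfin := pvPass_final (2 ^ k) (by positivity) (pvFwht (w.take (2 ^ k)))
      (pvFwht (w.drop (2 ^ k))) (pvFwht_length k _ ha) (pvFwht_length k _ hb)
    rw [← he] at hfin
    rw [hfin]
    conv_rhs => rw [pvFwht]
    rw [dif_neg (by have h1 : 1 ≤ (2:Nat) ^ k := Nat.one_le_two_pow; omega)]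
    have hh : w.length / 2 = 2 ^ k := by omega
    rw [hh]

-- ===== VERDICT (by name: the statement is the Claim_ definition above) =====
theorem pvBody_eq (sbox : List Int) (v : Int) (t : Nat) :
    pvIter (2 ^ t) 1
      (((List.range (2 ^ t)).map
          (fun x => PySem.Int.bitCount (PySem.Int.band v (sbox.getD x 0)) % 2)).map
        (fun b => (-1 : Int) ^ b)) =
      pvFwht ((List.range (2 ^ t)).map (fun x => pvSign sbox v x)) := by
  rw [List.map_map]
  rw [pvIter_eq_pvFwht t _ (by simp)]
  rfl

theorem compute_nl_spec : Claim_equal_compute_nl := by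
  intro sbox n _ _
  unfold Spec_compute_nl compute_nl compute_nl_alt
  simp only [Nat.one_shiftLeft]
  congr 1
  funext min_nl v
  rw [pvBody_eq sbox v n.toNat]
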